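-- pv_equiv track=rewrite | github.com/724thomas/CodingChallenge_Python | baekjoon/2422.py | solution
-- ===== SOURCE A (Python) =====
-- from collections import defaultdict
--
-- def solution(n, m, arr):
--     forbid = defaultdict(set)
--     for u, v in arr:
--         forbid[u].add(v)
--         forbid[v].add(u)
--     ans = 0
--     for i in range(1, n + 1):
--         for j in range(i + 1, n + 1):
--             for k in range(j + 1, n + 1):
--                 if j in forbid[i] or k in forbid[i]:
--                     continue
--                 if i in forbid[j] or k in forbid[j]:
--                     continue
--                 if i in forbid[k] or j in forbid[k]:
--                     continue
--                 ans += 1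
--
--     return ans
-- ===== SOURCE B (Python) =====
-- from collections import defaultdict
--
-- def solution(n, m, arr):
--     # Count pairs (i, j) directly and replace the innermost k-scan by set arithmetic:
--     # for an allowed pair i < j, the number of valid k in (j, n] is (n - j) minus the
--     # number of neighbours of i or j lying in (j, n].
--     adj = defaultdict(set)
--     for u, v in arr:
--         adj[u].add(v)
--         adj[v].add(u)
--     ans = 0
--     for i in range(1, n + 1):
--         for j in range(i + 1, n + 1):
--             if j in adj[i]:
--                 continue
--             blocked = sum(1 for k in adj[i] | adj[j] if j < k <= n)
--             ans += (n - j) - blocked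
--     return ans
-- ===== Notes on version B (the rewrite author's own statement) =====
-- stated objective: faster
-- what changed: The innermost loop over all k is removed: for each allowed pair (i,j) the number of valid third vertices is computed arithmetically as (n-j) minus the count of neighbours of i or j in (j,n].
import Mathlib
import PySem

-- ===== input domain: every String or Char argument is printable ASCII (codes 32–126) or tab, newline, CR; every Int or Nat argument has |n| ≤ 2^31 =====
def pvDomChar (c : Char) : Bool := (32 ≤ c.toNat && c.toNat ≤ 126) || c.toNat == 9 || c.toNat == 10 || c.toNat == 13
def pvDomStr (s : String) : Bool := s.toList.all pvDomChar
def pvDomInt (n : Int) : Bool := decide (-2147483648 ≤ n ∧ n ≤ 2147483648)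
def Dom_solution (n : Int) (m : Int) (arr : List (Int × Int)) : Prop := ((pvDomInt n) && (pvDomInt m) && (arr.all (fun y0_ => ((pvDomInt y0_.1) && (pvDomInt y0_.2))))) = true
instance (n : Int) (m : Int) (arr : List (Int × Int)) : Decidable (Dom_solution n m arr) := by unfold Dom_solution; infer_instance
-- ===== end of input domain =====

-- B removes A's innermost loop over all k: for each allowed pair (i, j) it adds
-- (n - j) minus the count of neighbours of i or j lying in (j, n] (set arithmetic).

-- ===== PORT A =====
-- the defaultdict(set) build loop: 'forbid[u].add(v); forbid[v].add(u)'
def buildForbid (arr : List (Int × Int)) : PySem.Dict Int (PySem.Set Int) :=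
  arr.foldl (fun d p =>
    (d.modify p.1 PySem.Set.empty (fun s => PySem.Set.add s p.2)).modify p.2 PySem.Set.empty (fun s => PySem.Set.add s p.1))
    PySem.Dict.empty

def solution (n : Int) (m : Int) (arr : List (Int × Int)) : Int :=
  let forbid := buildForbid arr
  (PySem.List.pyRange 1 (n + 1) 1).foldl (fun ans i =>
    (PySem.List.pyRange (i + 1) (n + 1) 1).foldl (fun ans j =>
      (PySem.List.pyRange (j + 1) (n + 1) 1).foldl (fun ans k =>
        if (forbid.getD i PySem.Set.empty).contains j || (forbid.getD i PySem.Set.empty).contains k then ans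
        else if (forbid.getD j PySem.Set.empty).contains i || (forbid.getD j PySem.Set.empty).contains k then ans
        else if (forbid.getD k PySem.Set.empty).contains i || (forbid.getD k PySem.Set.empty).contains j then ans
        else ans + 1) ans) ans) 0

-- ===== PORT B =====
def solution_alt (n : Int) (m : Int) (arr : List (Int × Int)) : Int :=
  let adj := arr.foldl (fun d p =>
    (d.modify p.1 PySem.Set.empty (fun s => PySem.Set.add s p.2)).modify p.2 PySem.Set.empty (fun s => PySem.Set.add s p.1))
    PySem.Dict.empty
  (PySem.List.pyRange 1 (n + 1) 1).foldl (fun ans i =>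
    (PySem.List.pyRange (i + 1) (n + 1) 1).foldl (fun ans j =>
      if (adj.getD i PySem.Set.empty).contains j then ans
      else
        -- 'sum(1 for k in adj[i] | adj[j] if j < k <= n)': an order-independent sum over a set
        let blocked : Int :=
          ((PySem.Set.union (adj.getD i PySem.Set.empty) (adj.getD j PySem.Set.empty)).countP
            (fun k => decide (j < k) && decide (k ≤ n)) : Nat)
        ans + ((n - j) - blocked)) ans) 0

-- ===== PRECONDITION & SPEC =====
def Spec_solution (n : Int) (m : Int) (arr : List (Int × Int)) (out : Int) : Prop := out = solution_alt n m arr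
instance (n : Int) (m : Int) (arr : List (Int × Int)) (out : Int) : Decidable (Spec_solution n m arr out) := by unfold Spec_solution; infer_instance

-- ===== CLAIM (what is proved, stated in full; the proofs are below) =====
def Claim_equal_solution : Prop := ∀ (n : Int) (m : Int) (arr : List (Int × Int)), Dom_solution n m arr → Spec_solution n m arr (solution n m arr)

-- ===== LEMMAS AND PROOFS =====

-- one step of the adjacency build (definitionally the lambda in both ports)
def pvStep (d : PySem.Dict Int (PySem.Set Int)) (p : Int × Int) : PySem.Dict Int (PySem.Set Int) :=
  (d.modify p.1 PySem.Set.empty (fun s => PySem.Set.add s p.2)).modify p.2 PySem.Set.empty (fun s => PySem.Set.add s p.1)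

theorem mem_pvStep (d : PySem.Dict Int (PySem.Set Int)) (p : Int × Int) (x y : Int) :
    (y ∈ (pvStep d p).getD x PySem.Set.empty) ↔
      y ∈ d.getD x PySem.Set.empty ∨ (x = p.1 ∧ y = p.2) ∨ (x = p.2 ∧ y = p.1) := by
  obtain ⟨u, v⟩ := p
  unfold pvStep
  simp only [PySem.Dict.getD_modify]
  split_ifs <;> subst_eqs <;> simp <;> tauto

theorem mem_build (arr : List (Int × Int)) (d : PySem.Dict Int (PySem.Set Int)) (x y : Int) :
    (y ∈ (arr.foldl pvStep d).getD x PySem.Set.empty) ↔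
      y ∈ d.getD x PySem.Set.empty ∨ ∃ p ∈ arr, (x = p.1 ∧ y = p.2) ∨ (x = p.2 ∧ y = p.1) := by
  induction arr generalizing d with
  | nil => simp
  | cons q t ih =>
      rw [List.foldl_cons, ih, mem_pvStep]
      simp only [List.mem_cons]
      constructor
      · rintro ((h | h) | ⟨p, hp, h⟩)
        · exact Or.inl h
        · exact Or.inr ⟨q, Or.inl rfl, h⟩
        · exact Or.inr ⟨p, Or.inr hp, h⟩
      · rintro (h | ⟨p, (rfl | hp), h⟩)
        · exact Or.inl (Or.inl h)
        · exact Or.inl (Or.inr h)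
        · exact Or.inr ⟨p, hp, h⟩

theorem nodup_pvStep (d : PySem.Dict Int (PySem.Set Int)) (p : Int × Int) (x : Int)
    (h : ∀ z : Int, (d.getD z PySem.Set.empty).Nodup) : ((pvStep d p).getD x PySem.Set.empty).Nodup := by
  obtain ⟨u, v⟩ := p
  unfold pvStep
  simp only [PySem.Dict.getD_modify]
  split_ifs <;> first
    | exact PySem.Set.nodup_add _ _ (PySem.Set.nodup_add _ _ (h _))
    | exact PySem.Set.nodup_add _ _ (h _)
    | exact h _

theorem buildForbid_nodup (arr : List (Int × Int)) (x : Int) :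
    ((buildForbid arr).getD x PySem.Set.empty).Nodup := by
  rw [show buildForbid arr = arr.foldl pvStep PySem.Dict.empty from rfl]
  have hgen : ∀ (d : PySem.Dict Int (PySem.Set Int)), (∀ z : Int, (d.getD z PySem.Set.empty).Nodup) →
      ∀ x : Int, ((arr.foldl pvStep d).getD x PySem.Set.empty).Nodup := by
    induction arr with
    | nil => intro d h x; exact h x
    | cons q t ih =>
        intro d h x
        rw [List.foldl_cons]
        exact ih (pvStep d q) (fun z => nodup_pvStep d q z h) x
  exact hgen PySem.Dict.empty (fun z => by simp [PySem.Dict.getD_empty]) x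

theorem buildForbid_sym (arr : List (Int × Int)) (x y : Int) :
    y ∈ (buildForbid arr).getD x PySem.Set.empty ↔ x ∈ (buildForbid arr).getD y PySem.Set.empty := by
  rw [show buildForbid arr = arr.foldl pvStep PySem.Dict.empty from rfl, mem_build, mem_build]
  simp only [PySem.Dict.getD_empty]
  constructor
  · rintro (h | ⟨p, hp, (⟨h1, h2⟩ | ⟨h1, h2⟩)⟩)
    · simp at h
    · exact Or.inr ⟨p, hp, Or.inr ⟨h2, h1⟩⟩
    · exact Or.inr ⟨p, hp, Or.inl ⟨h2, h1⟩⟩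
  · rintro (h | ⟨p, hp, (⟨h1, h2⟩ | ⟨h1, h2⟩)⟩)
    · simp at h
    · exact Or.inr ⟨p, hp, Or.inr ⟨h2, h1⟩⟩
    · exact Or.inr ⟨p, hp, Or.inl ⟨h2, h1⟩⟩

theorem countP_range_eq (U : List Int) (hU : U.Nodup) (j n : Int) (p : Int → Bool)
    (hp : ∀ k : Int, p k = true ↔ k ∈ U) :
    (PySem.List.pyRange (j + 1) (n + 1) 1).countP p
      = U.countP (fun k => decide (j < k) && decide (k ≤ n)) := by
  rw [List.countP_eq_length_filter, List.countP_eq_length_filter]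
  apply List.Perm.length_eq
  apply (List.perm_ext_iff_of_nodup ((PySem.List.nodup_pyRange_one _ _).filter _) (hU.filter _)).2
  intro k
  simp only [List.mem_filter, PySem.List.mem_pyRange_one, hp, decide_eq_true_eq, Bool.and_eq_true]
  constructor
  · rintro ⟨⟨h1, h2⟩, h3⟩; exact ⟨h3, by omega, by omega⟩
  · rintro ⟨h1, h2, h3⟩; exact ⟨⟨by omega, by omega⟩, h1⟩

theorem body3_eq (a : Int) (c1 c2 c3 c4 c5 c6 : Bool) :
    (if c1 || c2 then a else if c3 || c4 then a else if c5 || c6 then a else a + 1)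
      = if !(c1 || c2) && (!(c3 || c4) && !(c5 || c6)) then a + 1 else a := by
  cases c1 <;> cases c2 <;> cases c3 <;> cases c4 <;> cases c5 <;> cases c6 <;> simp

theorem inner_eq (F : PySem.Dict Int (PySem.Set Int))
    (hsym : ∀ x y : Int, y ∈ F.getD x PySem.Set.empty ↔ x ∈ F.getD y PySem.Set.empty)
    (hnd : ∀ x : Int, (F.getD x PySem.Set.empty).Nodup)
    (n i j a : Int) (hjn : j < n + 1) :
    (PySem.List.pyRange (j + 1) (n + 1) 1).foldl (fun ans k =>
        if (F.getD i PySem.Set.empty).contains j || (F.getD i PySem.Set.empty).contains k then ans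
        else if (F.getD j PySem.Set.empty).contains i || (F.getD j PySem.Set.empty).contains k then ans
        else if (F.getD k PySem.Set.empty).contains i || (F.getD k PySem.Set.empty).contains j then ans
        else ans + 1) a
      = if (F.getD i PySem.Set.empty).contains j then a
        else a + ((n - j) -
          (((PySem.Set.union (F.getD i PySem.Set.empty) (F.getD j PySem.Set.empty)).countP
            (fun k => decide (j < k) && decide (k ≤ n)) : Nat) : Int)) := by
  have hsymc : ∀ x y : Int, (F.getD x PySem.Set.empty).contains y = (F.getD y PySem.Set.empty).contains x := by
    intro x y
    rw [Bool.eq_iff_iff, PySem.Set.contains_iff, PySem.Set.contains_iff]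
    exact hsym x y
  have hb : (fun (ans : Int) (k : Int) =>
        if (F.getD i PySem.Set.empty).contains j || (F.getD i PySem.Set.empty).contains k then ans
        else if (F.getD j PySem.Set.empty).contains i || (F.getD j PySem.Set.empty).contains k then ans
        else if (F.getD k PySem.Set.empty).contains i || (F.getD k PySem.Set.empty).contains j then ans
        else ans + 1)
      = fun ans k =>
        if (!((F.getD i PySem.Set.empty).contains j || (F.getD i PySem.Set.empty).contains k) &&
            (!((F.getD j PySem.Set.empty).contains i || (F.getD j PySem.Set.empty).contains k) &&
             !((F.getD k PySem.Set.empty).contains i || (F.getD k PySem.Set.empty).contains j))) then ans + 1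
        else ans := funext fun ans => funext fun k => body3_eq ans _ _ _ _ _ _
  rw [hb, PySem.List.foldl_if_add_one]
  by_cases hij : (F.getD i PySem.Set.empty).contains j
  · rw [if_pos hij]
    have h0 : List.countP (fun k =>
        (!((F.getD i PySem.Set.empty).contains j || (F.getD i PySem.Set.empty).contains k) &&
          (!((F.getD j PySem.Set.empty).contains i || (F.getD j PySem.Set.empty).contains k) &&
           !((F.getD k PySem.Set.empty).contains i || (F.getD k PySem.Set.empty).contains j))))
        (PySem.List.pyRange (j + 1) (n + 1) 1) = 0 :=
      List.countP_eq_zero.2 (fun k _ => by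
        have hj : j ∈ F.getD i ([] : PySem.Set Int) := (PySem.Set.contains_iff _ _).1 hij
        simp
        intro h
        exact absurd hj h)
    rw [h0]
    simp
  · rw [if_neg hij]
    have hij' : (F.getD i PySem.Set.empty).contains j = false := by
      cases hb' : (F.getD i PySem.Set.empty).contains j
      · rfl
      · exact absurd hb' hij
    have hpg : (fun k =>
        (!((F.getD i PySem.Set.empty).contains j || (F.getD i PySem.Set.empty).contains k) &&
          (!((F.getD j PySem.Set.empty).contains i || (F.getD j PySem.Set.empty).contains k) &&
           !((F.getD k PySem.Set.empty).contains i || (F.getD k PySem.Set.empty).contains j))))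
      = fun k => !((F.getD i PySem.Set.empty).contains k || (F.getD j PySem.Set.empty).contains k) := by
      funext k
      rw [hsymc k i, hsymc k j, hsymc j i, hij']
      by_cases h1 : k ∈ F.getD i ([] : PySem.Set Int) <;> by_cases h2 : k ∈ F.getD j ([] : PySem.Set Int) <;>
        simp [h1, h2]
    rw [hpg]
    have hsplit := List.length_eq_countP_add_countP
      (fun k => (F.getD i PySem.Set.empty).contains k || (F.getD j PySem.Set.empty).contains k)
      (l := PySem.List.pyRange (j + 1) (n + 1) 1)
    have hnegeq : (fun k => decide ¬((fun k => (F.getD i PySem.Set.empty).contains k || (F.getD j PySem.Set.empty).contains k) k = true))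
        = fun k => !((F.getD i PySem.Set.empty).contains k || (F.getD j PySem.Set.empty).contains k) := by
      funext k
      by_cases h1 : k ∈ F.getD i ([] : PySem.Set Int) <;> by_cases h2 : k ∈ F.getD j ([] : PySem.Set Int) <;>
        simp [h1, h2]
    rw [hnegeq] at hsplit
    have hcnt : List.countP (fun k => (F.getD i PySem.Set.empty).contains k || (F.getD j PySem.Set.empty).contains k)
        (PySem.List.pyRange (j + 1) (n + 1) 1)
        = (PySem.Set.union (F.getD i PySem.Set.empty) (F.getD j PySem.Set.empty)).countP
            (fun k => decide (j < k) && decide (k ≤ n)) := by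
      apply countP_range_eq _ (PySem.Set.nodup_union _ _ (hnd i)) j n
      intro k
      simp [PySem.Set.mem_union, PySem.Set.contains_iff]
    have hL : (PySem.List.pyRange (j + 1) (n + 1) 1).length = (n - j).toNat := by
      rw [PySem.List.length_pyRange_one]
      congr 1
      omega
    rw [hL] at hsplit
    congr 1
    omega

-- ===== VERDICT (by name: the statement is the Claim_ definition above) =====
theorem solution_spec : Claim_equal_solution := by
  intro n m arr _
  show solution n m arr = solution_alt n m arr
  simp only [solution, solution_alt]
  apply PySem.List.foldl_congr_mem
  intro acc i _
  apply PySem.List.foldl_congr_mem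
  intro acc' j hj
  have hjn : j < n + 1 := ((PySem.List.mem_pyRange_one).1 hj).2
  exact inner_eq (buildForbid arr) (buildForbid_sym arr) (buildForbid_nodup arr) n i j acc' hjn
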